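-- pv_equiv track=rewrite | github.com/miliar/Code_Jam_Webscraper | solutions_python/solutions_year15_round0_nr1/2169.py | minimumToInvite
-- ===== SOURCE A (Python) =====
-- def parseAudience(audience):
-- 	result = []
-- 	for i in range(len(audience)):
-- 		result.append(int(audience[i]))
-- 	return result
--
-- def minimumToInvite(audience):
-- 	#sum of all prev positions >= current index number
-- 	audience = parseAudience(audience)
-- 	toInvite = []
-- 	prevSum = 0
-- 	for i in range(len(audience)):
-- 		toInvite.append(max(0,i-prevSum))
-- 		prevSum += (audience[i]+toInvite[i])
-- 	return sum(toInvite)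
-- ===== SOURCE B (Python) =====
-- def minimumToInvite(audience):
--     # One pass keeping only a running prefix sum of the ORIGINAL audience and the
--     # largest shortfall i - prefix seen so far; no toInvite list, no feedback of
--     # invited people into the running sum.
--     prefix = 0
--     needed = 0
--     for i, s in enumerate(audience):
--         gap = i - prefix
--         if gap > needed:
--             needed = gap
--         prefix += int(s)
--     return needed
-- ===== Notes on version B (the rewrite author's own statement) =====
-- stated objective: simpler
-- what changed: B replaces A's toInvite list and invited-people feedback into prevSum (answer = sum of the list) by a closed-form running maximum of the shortfalls i - (original prefix sum), returning that maximum directly.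
import Mathlib
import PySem

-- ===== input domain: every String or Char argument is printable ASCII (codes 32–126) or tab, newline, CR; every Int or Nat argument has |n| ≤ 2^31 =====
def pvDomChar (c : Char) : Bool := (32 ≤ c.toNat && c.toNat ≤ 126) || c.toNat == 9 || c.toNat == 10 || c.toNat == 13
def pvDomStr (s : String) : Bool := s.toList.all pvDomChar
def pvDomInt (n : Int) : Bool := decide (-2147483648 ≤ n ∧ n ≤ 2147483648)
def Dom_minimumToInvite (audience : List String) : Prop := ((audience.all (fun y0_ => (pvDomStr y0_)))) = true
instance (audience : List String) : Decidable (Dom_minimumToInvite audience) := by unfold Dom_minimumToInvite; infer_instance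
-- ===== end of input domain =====

-- B replaces A's toInvite list (answer = its sum, with invited people fed back into
-- prevSum) by a running maximum of the shortfalls i - (original prefix sum); simpler.

-- ===== PORT A =====
-- helper parseAudience: int(audience[i]) raises ValueError on non-int strings; Pre_ excludes that,
-- so the port reads the parse through .getD 0 (never reached under Pre_).
def parseAudienceA (audience : List String) : List Int :=
  (PySem.List.pyRange 0 audience.length 1).foldl
    (fun result i => result ++ [(PySem.Int.ofStr? (PySem.List.pyGetD audience i "")).getD 0]) []

def minimumToInvite (audience : List String) : Int :=
  let a := parseAudienceA audience
  let st := (PySem.List.pyRange 0 a.length 1).foldl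
    (fun (st : List Int × Int) i =>
      -- toInvite.append(max(0, i - prevSum)); prevSum += audience[i] + toInvite[i]
      -- (toInvite[i] is exactly the element just appended)
      let t := max 0 (i - st.2)
      (st.1 ++ [t], st.2 + (PySem.List.pyGetD a i 0 + t)))
    ([], 0)
  st.1.sum

-- ===== PORT B =====
def minimumToInvite_alt (audience : List String) : Int :=
  let st := (PySem.List.enumerate audience).foldl
    (fun (st : Int × Int) p =>
      let gap := p.1 - st.1
      let needed := if gap > st.2 then gap else st.2
      (st.1 + (PySem.Int.ofStr? p.2).getD 0, needed))
    (0, 0)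
  st.2

-- ===== PRECONDITION & SPEC =====
-- Pre_: every entry parses as a Python int (otherwise A's int() raises ValueError).
def Pre_minimumToInvite (audience : List String) : Prop :=
  ∀ s ∈ audience, (PySem.Int.ofStr? s).isSome = true
instance (audience : List String) : Decidable (Pre_minimumToInvite audience) := by
  unfold Pre_minimumToInvite; infer_instance
def pvWitness_minimumToInvite : List String := ["1", "0", "2"]

def Spec_minimumToInvite (audience : List String) (out : Int) : Prop := out = minimumToInvite_alt audience
instance (audience : List String) (out : Int) : Decidable (Spec_minimumToInvite audience out) := by unfold Spec_minimumToInvite; infer_instance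

-- ===== CLAIM (what is proved, stated in full; the proofs are below) =====
def Claim_equal_minimumToInvite : Prop := ∀ (audience : List String), Dom_minimumToInvite audience → Pre_minimumToInvite audience → Spec_minimumToInvite audience (minimumToInvite audience)

-- ===== LEMMAS AND PROOFS =====

theorem pv_foldl_append_map {α : Type} (f : α → Int) :
    ∀ (l : List α) (acc : List Int),
      l.foldl (fun r x => r ++ [f x]) acc = acc ++ l.map f := by
  intro l
  induction l with
  | nil => intro acc; simp
  | cons x xs ih => intro acc; simp [List.foldl_cons, ih]

theorem parseAudienceA_eq_map (audience : List String) :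
    parseAudienceA audience
      = audience.map (fun s => (PySem.Int.ofStr? s).getD 0) := by
  unfold parseAudienceA
  rw [pv_foldl_append_map]
  have h := PySem.List.map_pyGetD_pyRange_zero (xs := audience) (d := "")
  simp only [PySem.List.len_eq] at h
  calc (PySem.List.pyRange 0 (audience.length : Int) 1).map
          (fun i => (PySem.Int.ofStr? (PySem.List.pyGetD audience i "")).getD 0)
      = ((PySem.List.pyRange 0 (audience.length : Int) 1).map
          (fun i => PySem.List.pyGetD audience i "")).map
          (fun s => (PySem.Int.ofStr? s).getD 0) := by
        rw [List.map_map]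
        rfl
    _ = audience.map (fun s => (PySem.Int.ofStr? s).getD 0) := by rw [h]
    _ = _ := by simp

theorem pv_enumerate_map {α β : Type} (f : α → β) :
    ∀ (xs : List α) (s : Int),
      PySem.List.enumerate (xs.map f) s
        = (PySem.List.enumerate xs s).map (fun p => (p.1, f p.2)) := by
  intro xs
  induction xs with
  | nil => intro s; simp [PySem.List.enumerate_nil]
  | cons x xs ih => intro s; simp [PySem.List.enumerate_cons, ih]

-- Main loop invariant: A's state (toInvite, prevSum) and B's state (prefix, needed)
-- stay related by  toInvite.sum = needed  and  prevSum = pre + needed.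
theorem pv_loop_eq (f : String → Int) :
    ∀ (xs : List String) (i : Int) (ti : List Int) (prevSum pre needed : Int),
      ti.sum = needed → prevSum = pre + needed →
      ((PySem.List.enumerate xs i).foldl
          (fun (st : List Int × Int) (p : Int × String) =>
            (st.1 ++ [max 0 (p.1 - st.2)], st.2 + (f p.2 + max 0 (p.1 - st.2))))
          (ti, prevSum)).1.sum
      = ((PySem.List.enumerate xs i).foldl
          (fun (st : Int × Int) (p : Int × String) =>
            (st.1 + f p.2, if p.1 - st.1 > st.2 then p.1 - st.1 else st.2))
          (pre, needed)).2 := by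
  intro xs
  induction xs with
  | nil =>
    intro i ti prevSum pre needed h1 h2
    simpa [PySem.List.enumerate_nil] using h1
  | cons x xs ih =>
    intro i ti prevSum pre needed h1 h2
    simp only [PySem.List.enumerate_cons, List.foldl_cons]
    apply ih
    · simp [h1, h2]
      by_cases hc : i - pre > needed <;> simp [hc] <;> omega
    · by_cases hc : i - pre > needed <;> simp [hc] <;> omega

-- ===== VERDICT (by name: the statement is the Claim_ definition above) =====
theorem minimumToInvite_spec : Claim_equal_minimumToInvite := by
  intro audience _ _
  unfold Spec_minimumToInvite minimumToInvite minimumToInvite_alt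
  simp only []
  set f : String → Int := fun s => (PySem.Int.ofStr? s).getD 0 with hf
  set a : List Int := parseAudienceA audience with ha
  -- rewrite A's indexed fold over range(len a) as a fold over enumerate a 0
  have hconv :
      (PySem.List.pyRange 0 (a.length : Int) 1).foldl
          (fun (st : List Int × Int) i =>
            (st.1 ++ [max 0 (i - st.2)], st.2 + (PySem.List.pyGetD a i 0 + max 0 (i - st.2))))
          ([], 0)
      = (PySem.List.enumerate a 0).foldl
          (fun (st : List Int × Int) (p : Int × Int) =>
            (st.1 ++ [max 0 (p.1 - st.2)], st.2 + (p.2 + max 0 (p.1 - st.2))))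
          ([], 0) := by
    rw [PySem.List.enumerate_eq_map_pyRange (xs := a) (d := 0), List.foldl_map]
    simp only [PySem.List.len_eq]
  show ((PySem.List.pyRange 0 (a.length : Int) 1).foldl _ ([], 0)).1.sum = _
  rw [hconv]
  have hparse : a = audience.map f := by rw [ha, hf]; exact parseAudienceA_eq_map audience
  rw [hparse, pv_enumerate_map, List.foldl_map]
  exact pv_loop_eq f audience 0 [] 0 0 0 rfl rfl
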